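-- pv_equiv track=rewrite | github.com/pypi-data/pypi-mirror-352 | packages/fastapi-tortoise-crud/fastapi_tortoise_crud-1.1.0-py3-none-any.whl/fastapi_tortoise_crud/features/relations/utils.py | optimize_relations
-- ===== SOURCE A (Python) =====
-- from typing import Any, Dict, List, Optional, Type, Union, Set
--
-- def optimize_relations(relations: List[str]) -> List[str]:
--     """
--     优化关系列表，移除冗余的关系
--
--     Args:
--         relations: 关系字段名列表
--
--     Returns:
--         List[str]: 优化后的关系列表
--     """
--     # 按长度排序，短的在前
--     sorted_relations = sorted(relations, key=len)
--     optimized = []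
--
--     for relation in sorted_relations:
--         # 检查是否已经被更短的关系包含
--         is_redundant = False
--         for existing in optimized:
--             if relation.startswith(existing + '__'):
--                 is_redundant = True
--                 break
--
--         if not is_redundant:
--             optimized.append(relation)
--
--     return optimized
-- ===== SOURCE B (Python) =====
-- def optimize_relations(relations):
--     present = set(relations)
--     result = []
--     for rel in sorted(relations, key=len):
--         if not any(rel[i:i + 2] == '__' and rel[:i] in present
--                    for i in range(len(rel))):
--             result.append(rel)
--     return result
-- ===== Notes on version B (the rewrite author's own statement) =====
-- stated objective: faster
-- what changed: Instead of scanning the already-kept list for an ancestor of each relation (A's inner loop), B builds a hash set of all relations once and tests each '__'-boundary proper prefix of the relation for membership in it.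
import Mathlib
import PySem

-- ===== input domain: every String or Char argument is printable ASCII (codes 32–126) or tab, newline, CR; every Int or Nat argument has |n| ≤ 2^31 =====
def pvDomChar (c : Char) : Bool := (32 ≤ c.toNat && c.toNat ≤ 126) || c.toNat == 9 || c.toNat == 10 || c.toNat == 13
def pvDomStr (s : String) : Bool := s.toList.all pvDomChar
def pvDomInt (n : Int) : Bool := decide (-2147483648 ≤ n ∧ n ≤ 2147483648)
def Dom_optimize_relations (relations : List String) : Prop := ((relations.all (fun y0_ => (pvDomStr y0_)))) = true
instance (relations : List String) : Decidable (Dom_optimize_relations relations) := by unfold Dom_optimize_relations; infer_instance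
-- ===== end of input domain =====

-- B replaces A's inner scan over the kept list by a membership test (in a set of all relations)
-- of each '__'-boundary prefix of the relation; objective: faster (removes the O(n) inner scan).

-- ===== PORT A =====
def optimize_relations (relations : List String) : List String :=
  let sorted_relations := PySem.List.sorted relations (fun s => PySem.Str.len s)
  sorted_relations.foldl
    (fun optimized relation =>
      if optimized.any (fun existing => PySem.Str.startswith relation (existing ++ "__")) then
        optimized
      else
        optimized ++ [relation])
    []

-- ===== PORT B =====
-- helper for B: rel has some '__'-boundary proper prefix that is in `present`
def pvHasRedundantPrefix (present : PySem.Set String) (rel : String) : Bool :=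
  (PySem.List.pyRange 0 (PySem.Str.len rel)).any (fun i =>
    (PySem.Str.slice rel (some i) (some (i + 2)) == "__") &&
    PySem.Set.contains present (PySem.Str.slice rel none (some i)))

def optimize_relations_alt (relations : List String) : List String :=
  let present := PySem.Set.ofList relations
  (PySem.List.sorted relations (fun s => PySem.Str.len s)).foldl
    (fun result rel => if pvHasRedundantPrefix present rel then result else result ++ [rel])
    []

-- ===== PRECONDITION & SPEC =====
def Spec_optimize_relations (relations : List String) (out : List String) : Prop := out = optimize_relations_alt relations
instance (relations : List String) (out : List String) : Decidable (Spec_optimize_relations relations out) := by unfold Spec_optimize_relations; infer_instance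

-- ===== CLAIM (what is proved, stated in full; the proofs are below) =====
def Claim_equal_optimize_relations : Prop := ∀ (relations : List String), Dom_optimize_relations relations → Spec_optimize_relations relations (optimize_relations relations)

-- ===== LEMMAS AND PROOFS =====

-- A's loop body and B's loop body, named for the proofs (definitionally the ports' lambdas)
def pvStepA (optimized : List String) (relation : String) : List String :=
  if optimized.any (fun existing => PySem.Str.startswith relation (existing ++ "__")) then optimized
  else optimized ++ [relation]

def pvStepB (relations : List String) (result : List String) (rel : String) : List String :=
  if pvHasRedundantPrefix (PySem.Set.ofList relations) rel then result else result ++ [rel]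

-- "e is an ancestor of r": e followed by '__' is a prefix of r
def pvCond (e r : String) : Prop := e.toList ++ ['_', '_'] <+: r.toList

lemma pvChk_iff (r e : String) :
    PySem.Str.startswith r (e ++ "__") = true ↔ pvCond e r := by
  have h2 : ("__" : String).toList = ['_', '_'] := rfl
  simp [pvCond, PySem.Chars.startswith_iff, String.toList_append, h2]

lemma pvCond_trans {e p r : String} (h1 : pvCond e p) (h2 : pvCond p r) : pvCond e r :=
  h1.trans ((List.prefix_append _ _).trans h2)

lemma pvFoldA_any (r : String) (P : List String) : ∀ (acc : List String),
    ((P.foldl pvStepA acc).any (fun e => PySem.Str.startswith r (e ++ "__")) = true) ↔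
    (acc.any (fun e => PySem.Str.startswith r (e ++ "__")) = true ∨ ∃ p ∈ P, pvCond p r) := by
  induction P with
  | nil => simp
  | cons x P ih =>
    intro acc
    by_cases hx : acc.any (fun e => PySem.Str.startswith x (e ++ "__")) = true
    · rw [List.foldl_cons, show pvStepA acc x = acc from by unfold pvStepA; rw [if_pos hx], ih]
      constructor
      · rintro (h | ⟨p, hp, hc⟩)
        · exact Or.inl h
        · exact Or.inr ⟨p, List.mem_cons_of_mem _ hp, hc⟩
      · rintro (h | ⟨p, hp, hc⟩)
        · exact Or.inl h
        · rcases List.mem_cons.1 hp with rfl | hp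
          · rcases List.any_eq_true.1 hx with ⟨e, he, hchk⟩
            exact Or.inl (List.any_eq_true.2 ⟨e, he,
              (pvChk_iff r e).2 (pvCond_trans ((pvChk_iff p e).1 hchk) hc)⟩)
          · exact Or.inr ⟨p, hp, hc⟩
    · rw [List.foldl_cons, show pvStepA acc x = acc ++ [x] from by unfold pvStepA; rw [if_neg hx], ih]
      simp only [List.any_append, List.any_cons, List.any_nil, Bool.or_eq_true, Bool.or_false,
        List.mem_cons, pvChk_iff]
      constructor
      · rintro ((h | h) | ⟨p, hp, hc⟩)
        · exact Or.inl h
        · exact Or.inr ⟨x, Or.inl rfl, h⟩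
        · exact Or.inr ⟨p, Or.inr hp, hc⟩
      · rintro (h | ⟨p, (rfl | hp), hc⟩)
        · exact Or.inl (Or.inl h)
        · exact Or.inl (Or.inr hc)
        · exact Or.inr ⟨p, hp, hc⟩

lemma pvRed_iff (relations : List String) (r : String) :
    pvHasRedundantPrefix (PySem.Set.ofList relations) r = true ↔ ∃ p ∈ relations, pvCond p r := by
  unfold pvHasRedundantPrefix
  rw [List.any_eq_true]
  constructor
  · rintro ⟨i, hi, h⟩
    rw [PySem.List.mem_pyRange_one] at hi
    obtain ⟨h0, hlt⟩ := hi
    rw [Bool.and_eq_true, beq_iff_eq] at h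
    obtain ⟨hs, hc⟩ := h
    lift i to ℕ using h0 with k
    have hseq : (PySem.Str.slice r (some (k : ℤ)) (some ((k : ℤ) + 2))).toList =
        (r.toList.drop k).take 2 := by
      rw [PySem.Str.toList_slice, PySem.Chars.slice_eq_listSlice,
        show ((k : ℤ) + 2) = ((k + 2 : ℕ) : ℤ) from by push_cast; ring,
        PySem.List.slice_natCast]
      congr 1
      omega
    have hpeq : (PySem.Str.slice r none (some (k : ℤ))).toList = r.toList.take k := by
      rw [PySem.Str.toList_slice, PySem.Chars.slice_eq_listSlice,
        PySem.List.slice_to _ (by positivity)]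
      simp
    have h2 : (r.toList.drop k).take 2 = ['_', '_'] := by
      rw [← hseq, hs]; rfl
    refine ⟨PySem.Str.slice r none (some (k : ℤ)), ?_, ?_⟩
    · exact (PySem.Set.mem_ofList relations _).1 (by simpa [PySem.Set.contains] using hc)
    · show (PySem.Str.slice r none (some (k : ℤ))).toList ++ ['_', '_'] <+: r.toList
      rw [hpeq, ← h2]
      refine ⟨(r.toList.drop k).drop 2, ?_⟩
      rw [List.append_assoc, List.take_append_drop, List.take_append_drop]
  · rintro ⟨p, hp, hcond⟩
    obtain ⟨t, ht⟩ := hcond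
    set k := p.toList.length with hk
    have hlen : k + 2 + t.length = r.toList.length := by
      have hc := congrArg List.length ht
      simp only [List.length_append, List.length_cons, List.length_nil] at hc
      omega
    have hdrop : r.toList.drop k = ['_', '_'] ++ t := by
      rw [← ht, List.append_assoc, List.drop_left]
    refine ⟨(k : ℤ), ?_, ?_⟩
    · rw [PySem.List.mem_pyRange_one, PySem.Str.len_eq]
      constructor
      · positivity
      · exact_mod_cast (by omega : k < r.toList.length)
    · rw [Bool.and_eq_true, beq_iff_eq]
      have hseq : (PySem.Str.slice r (some (k : ℤ)) (some ((k : ℤ) + 2))).toList =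
          (r.toList.drop k).take 2 := by
        rw [PySem.Str.toList_slice, PySem.Chars.slice_eq_listSlice,
          show ((k : ℤ) + 2) = ((k + 2 : ℕ) : ℤ) from by push_cast; ring,
          PySem.List.slice_natCast]
        congr 1
        omega
      have hpeq : (PySem.Str.slice r none (some (k : ℤ))).toList = r.toList.take k := by
        rw [PySem.Str.toList_slice, PySem.Chars.slice_eq_listSlice,
          PySem.List.slice_to _ (by positivity)]
        simp
      constructor
      · apply String.toList_inj.1
        rw [hseq, hdrop]
        rfl
      · have : PySem.Str.slice r none (some (k : ℤ)) = p := by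
          apply String.toList_inj.1
          rw [hpeq, ← ht, List.append_assoc, List.take_left]
        rw [this]
        simp [PySem.Set.contains, (PySem.Set.mem_ofList relations p).2 hp]

lemma pvMainFold (relations L : List String)
    (hpw : L.Pairwise (fun a b => a.toList.length ≤ b.toList.length))
    (hmem : ∀ x, x ∈ L ↔ x ∈ relations) :
    ∀ (S P acc : List String), L = P ++ S → acc = P.foldl pvStepA [] →
      S.foldl pvStepA acc = S.foldl (pvStepB relations) acc := by
  intro S
  induction S with
  | nil => intro _ _ _ _; rfl
  | cons r S ih =>
    intro P acc hL hacc
    have hred : (acc.any (fun e => PySem.Str.startswith r (e ++ "__")) = true) ↔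
        pvHasRedundantPrefix (PySem.Set.ofList relations) r = true := by
      rw [hacc, pvFoldA_any, pvRed_iff]
      simp only [List.any_nil, Bool.false_eq_true, false_or]
      constructor
      · rintro ⟨p, hpP, hc⟩
        exact ⟨p, (hmem p).1 (hL ▸ List.mem_append_left _ hpP), hc⟩
      · rintro ⟨p, hpRel, hc⟩
        obtain ⟨t, htp⟩ := hc
        have hplen : p.toList.length + 2 ≤ r.toList.length := by
          rw [← htp]; simp
        have hpL : p ∈ L := (hmem p).2 hpRel
        rw [hL] at hpL
        rcases List.mem_append.1 hpL with hpP | hps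
        · exact ⟨p, hpP, ⟨t, htp⟩⟩
        · exfalso
          have hsub : (r :: S).Pairwise (fun a b => a.toList.length ≤ b.toList.length) :=
            (hL ▸ hpw).sublist (List.sublist_append_right P (r :: S))
          rcases List.mem_cons.1 hps with rfl | hpS
          · omega
          · have := (List.pairwise_cons.1 hsub).1 p hpS
            omega
    have hstep : pvStepA acc r = pvStepB relations acc r := by
      unfold pvStepA pvStepB
      by_cases h : acc.any (fun e => PySem.Str.startswith r (e ++ "__")) = true
      · rw [if_pos h, if_pos (hred.1 h)]
      · rw [if_neg h, if_neg (fun hb => h (hred.2 hb))]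
    rw [List.foldl_cons, List.foldl_cons, ← hstep]
    exact ih (P ++ [r]) (pvStepA acc r) (by rw [hL, List.append_assoc]; rfl)
      (by rw [List.foldl_append, ← hacc]; rfl)

-- ===== VERDICT (by name: the statement is the Claim_ definition above) =====
theorem optimize_relations_spec : Claim_equal_optimize_relations := by
  intro relations _
  show optimize_relations relations = optimize_relations_alt relations
  show (PySem.List.sorted relations (fun s => PySem.Str.len s)).foldl pvStepA [] =
    (PySem.List.sorted relations (fun s => PySem.Str.len s)).foldl (pvStepB relations) []
  refine pvMainFold relations _ ?_ ?_ _ [] [] rfl rfl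
  · refine (PySem.List.sorted_pairwise relations (fun s => PySem.Str.len s)).imp ?_
    intro a b h
    rw [PySem.Str.len_eq, PySem.Str.len_eq] at h
    exact_mod_cast h
  · exact fun x => PySem.List.mem_sorted relations _ _ x
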